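-- pv_equiv track=rewrite | github.com/psp515/IntroductionToComputerScience | Z6/Programs/task6.py | sum_check
-- ===== SOURCE A (Python) =====
-- def sum_check(arr, n):
--     i = 0
--     sum = 0
--     index_sum = 0
--     one_count = 0
--     while n > 0:
--         if n % 2 == 1:
--             sum += arr[i]
--             index_sum += i
--             one_count += 1
--         n //= 2
--         i += 1
--     return (one_count, sum) if sum == index_sum else (-1, -1)
-- ===== SOURCE B (Python) =====
-- def sum_check(arr, n):
--     # Structural recursion on the array: peel the head, halve the mask.
--     # No index variable exists; the index sum is recovered from the identity
--     # sum(indices in x::rest) = sum(indices in rest, re-based at 0) + count(rest).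
--     def go(lst, m):
--         if not lst or m <= 0:
--             return (0, 0, 0)
--         c, t, s = go(lst[1:], m >> 1)
--         if m & 1:
--             return (c + 1, t + lst[0], s + c)
--         return (c, t, s + c)
--     c, t, s = go(arr, n)
--     return (c, t) if t == s else (-1, -1)
-- ===== Notes on version B (the rewrite author's own statement) =====
-- stated objective: alternative
-- what changed: B replaces A's iterative while-loop over the bits of n (with an explicit running index and four mutable accumulators) by a structural recursion over the array that peels the head and halves the mask, with no index variable at all: the index sum is reconstructed on the way back up from the identity sum(indices) = sum(tail indices re-based at 0) + count(tail).
import Mathlib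
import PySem

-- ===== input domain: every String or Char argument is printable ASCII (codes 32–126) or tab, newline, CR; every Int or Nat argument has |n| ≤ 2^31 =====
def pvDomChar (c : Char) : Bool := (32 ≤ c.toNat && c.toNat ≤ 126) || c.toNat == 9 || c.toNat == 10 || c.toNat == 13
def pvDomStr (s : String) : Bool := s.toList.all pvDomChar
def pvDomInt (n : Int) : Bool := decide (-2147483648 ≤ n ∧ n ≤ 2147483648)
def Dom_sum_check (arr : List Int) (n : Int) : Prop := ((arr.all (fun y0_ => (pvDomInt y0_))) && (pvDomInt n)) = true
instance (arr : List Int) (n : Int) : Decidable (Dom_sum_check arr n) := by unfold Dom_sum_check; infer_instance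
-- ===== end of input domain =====

-- B replaces A's indexed while-loop over the bits of n by a structural recursion over the array
-- (head peeled, mask halved, index sum rebuilt from a count identity) — alternative decomposition, same cost.
-- Equivalence is about the RETURN value; neither program mutates its arguments.

-- ===== PORT A =====
-- while n > 0: the fused loop carrying (i, sum, index_sum, one_count); arr[i] is in range under Pre_ (pyGetD's default is unreachable there)
def sum_check_loop (arr : List Int) (n i s isum c : Int) : Int × Int × Int :=
  if h : 0 < n then
    if PySem.Int.mod n 2 = 1 then
      sum_check_loop arr (PySem.Int.floordiv n 2) (i + 1) (s + PySem.List.pyGetD arr i 0) (isum + i) (c + 1)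
    else
      sum_check_loop arr (PySem.Int.floordiv n 2) (i + 1) s isum c
  else (c, s, isum)
termination_by n.toNat
decreasing_by
  all_goals
    have h2 : PySem.Int.floordiv n 2 = n / 2 := PySem.Int.floordiv_eq_ediv_of_pos (by omega)
    omega

def sum_check (arr : List Int) (n : Int) : Int × Int :=
  let r := sum_check_loop arr n 0 0 0 0
  if r.2.1 = r.2.2 then (r.1, r.2.1) else (-1, -1)

-- ===== PORT B =====
-- go lst m: structural recursion on the list; returns (count, total, index_sum); lst[0] is in range, lst[1:] is List.tail
def sum_check_go : List Int → Int → Int × Int × Int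
  | [], _ => (0, 0, 0)
  | x :: rest, m =>
    if m ≤ 0 then (0, 0, 0)
    else
      match sum_check_go rest (m >>> (1 : Nat)) with
      | (c, t, s) =>
        if PySem.Int.band m 1 = 1 then (c + 1, t + x, s + c) else (c, t, s + c)

def sum_check_alt (arr : List Int) (n : Int) : Int × Int :=
  let r := sum_check_go arr n
  if r.2.1 = r.2.2 then (r.1, r.2.1) else (-1, -1)

-- ===== PRECONDITION & SPEC =====
-- Pre_ excludes exactly the inputs where A raises IndexError: n ≥ 2^len(arr) has a set bit at position ≥ len(arr)
def Pre_sum_check (arr : List Int) (n : Int) : Prop := n < 2 ^ arr.length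
instance (arr : List Int) (n : Int) : Decidable (Pre_sum_check arr n) := by unfold Pre_sum_check; infer_instance
def pvWitness_sum_check : List Int × Int := ([3, 7, 4], 5)
def Spec_sum_check (arr : List Int) (n : Int) (out : Int × Int) : Prop := out = sum_check_alt arr n
instance (arr : List Int) (n : Int) (out : Int × Int) : Decidable (Spec_sum_check arr n out) := by unfold Spec_sum_check; infer_instance

-- ===== CLAIM (what is proved, stated in full; the proofs are below) =====
def Claim_equal_sum_check : Prop := ∀ (arr : List Int) (n : Int), Dom_sum_check arr n → Pre_sum_check arr n → Spec_sum_check arr n (sum_check arr n)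

-- ===== LEMMAS AND PROOFS =====

-- the list of set-bit positions of n, starting at index i: common characterization of both loops
def pvBits (n i : Int) : List Int :=
  if _h : 0 < n then
    (if PySem.Int.mod n 2 = 1 then [i] else []) ++ pvBits (PySem.Int.floordiv n 2) (i + 1)
  else []
termination_by n.toNat
decreasing_by
  all_goals
    have h2 : PySem.Int.floordiv n 2 = n / 2 := PySem.Int.floordiv_eq_ediv_of_pos (by omega)
    omega

lemma pvBits_nonpos {n : Int} (h : ¬ 0 < n) (i : Int) : pvBits n i = [] := by
  rw [pvBits]; simp [h]

lemma pvBits_shift (n i : Int) : pvBits n (i + 1) = (pvBits n i).map (· + 1) := by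
  induction n, i using pvBits.induct with
  | case1 n i h ih =>
      conv_lhs => rw [pvBits]
      conv_rhs => rw [pvBits]
      rw [dif_pos h, dif_pos h, List.map_append, ih]
      simp only [PySem.Int.mod_eq_emod_of_pos (show (0:Int) < 2 by omega)]
      by_cases hm : n % 2 = 1 <;> simp [hm]
  | case2 n i h => rw [pvBits_nonpos h, pvBits_nonpos h]; simp

lemma pvBits_mem_le (n i : Int) : ∀ j ∈ pvBits n i, i ≤ j := by
  induction n, i using pvBits.induct with
  | case1 n i h ih =>
      intro j hj
      rw [pvBits, dif_pos h] at hj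
      rcases List.mem_append.mp hj with hj | hj
      · by_cases hm : PySem.Int.mod n 2 = 1 <;> simp at hj <;> omega
      · have := ih j hj; omega
  | case2 n i h => intro j hj; rw [pvBits_nonpos h] at hj; simp at hj

lemma loop_eq_bits (arr : List Int) (n i s isum c : Int) :
    sum_check_loop arr n i s isum c =
      (c + (pvBits n i).length,
       s + ((pvBits n i).map (fun j => PySem.List.pyGetD arr j 0)).sum,
       isum + (pvBits n i).sum) := by
  induction n, i, s, isum, c using sum_check_loop.induct arr with
  | case1 n i s isum c h hmod ih =>
      rw [sum_check_loop, pvBits]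
      simp only [PySem.Int.mod_eq_emod_of_pos (show (0:Int) < 2 by omega),
        PySem.Int.floordiv_eq_ediv_of_pos (show (0:Int) < 2 by omega)] at ih hmod ⊢
      simp [h, hmod, ih]
      refine ⟨by ring, by ring, by ring⟩
  | case2 n i s isum c h hmod ih =>
      rw [sum_check_loop, pvBits]
      simp only [PySem.Int.mod_eq_emod_of_pos (show (0:Int) < 2 by omega),
        PySem.Int.floordiv_eq_ediv_of_pos (show (0:Int) < 2 by omega)] at ih hmod ⊢
      simp [h, hmod, ih]
  | case3 n i s isum c h =>
      rw [sum_check_loop, pvBits]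
      simp [h]

lemma pyGetD_cons_succ (x : Int) (rest : List Int) (j : Int) (hj : 0 ≤ j) :
    PySem.List.pyGetD (x :: rest) (j + 1) 0 = PySem.List.pyGetD rest j 0 := by
  have h1 : j = ((j.toNat : Nat) : Int) := by omega
  rw [h1, show ((j.toNat : Nat) : Int) + 1 = ((j.toNat + 1 : Nat) : Int) by push_cast; ring,
    PySem.List.pyGetD_natCast, PySem.List.pyGetD_natCast]
  rfl

lemma go_eq_bits : ∀ (lst : List Int) (m : Int), 0 ≤ m → m < 2 ^ lst.length →
    sum_check_go lst m =
      (((pvBits m 0).length : Int),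
       ((pvBits m 0).map (fun j => PySem.List.pyGetD lst j 0)).sum,
       (pvBits m 0).sum) := by
  intro lst
  induction lst with
  | nil =>
      intro m h0 hlt
      simp only [List.length_nil, pow_zero] at hlt
      have : m = 0 := by omega
      subst this
      rw [sum_check_go, pvBits_nonpos (by omega)]; simp
  | cons x rest ih =>
      intro m h0 hlt
      by_cases hm : m ≤ 0
      · have : m = 0 := by omega
        subst this
        rw [sum_check_go, pvBits_nonpos (by omega)]; simp
      · have hpos : 0 < m := by omega
        have hsh : m >>> (1 : Nat) = m / 2 := by
          rw [Int.shiftRight_eq_div_pow]; norm_num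
        have hfd : PySem.Int.floordiv m 2 = m / 2 := PySem.Int.floordiv_eq_ediv_of_pos (by omega)
        have hrec := ih (m >>> (1 : Nat)) (by rw [hsh]; omega)
          (by rw [hsh]; simp only [List.length_cons] at hlt; rw [pow_succ] at hlt; omega)
        have hband : PySem.Int.band m 1 = PySem.Int.mod m 2 := PySem.Int.band_one m
        have hshift : pvBits (m >>> (1 : Nat)) 1 =
            (pvBits (m >>> (1 : Nat)) 0).map (· + 1) := by
          have := pvBits_shift (m >>> (1 : Nat)) 0
          simpa using this
        have hL : pvBits m 0 = (if PySem.Int.mod m 2 = 1 then [(0:Int)] else []) ++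
            (pvBits (m >>> (1 : Nat)) 0).map (· + 1) := by
          conv_lhs => rw [pvBits]
          rw [dif_pos hpos, hfd, ← hsh, zero_add, hshift]
        rw [sum_check_go, if_neg hm, hrec, hL]
        have hmapget : ((pvBits (m >>> (1 : Nat)) 0).map (· + 1)).map
              (fun j => PySem.List.pyGetD (x :: rest) j 0)
            = (pvBits (m >>> (1 : Nat)) 0).map (fun j => PySem.List.pyGetD rest j 0) := by
          rw [List.map_map]
          apply List.map_congr_left
          intro j hj
          have hj0 : 0 ≤ j := pvBits_mem_le _ 0 j hj
          simp only [Function.comp]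
          exact pyGetD_cons_succ x rest j hj0
        have hmapget2 : (List.map ((fun j => PySem.List.pyGetD (x :: rest) j 0) ∘ fun y => y + 1)
              (pvBits (m >>> (1 : Nat)) 0))
            = List.map (fun j => PySem.List.pyGetD rest j 0) (pvBits (m >>> (1 : Nat)) 0) := by
          apply List.map_congr_left
          intro j hj
          have hj0 : 0 ≤ j := pvBits_mem_le _ 0 j hj
          simp only [Function.comp]
          exact pyGetD_cons_succ x rest j hj0
        by_cases hb : PySem.Int.mod m 2 = 1
        · simp only [hband, hb, List.map_append, List.sum_append, List.length_append]
          refine Prod.ext ?_ (Prod.ext ?_ ?_) <;> simp [hmapget] <;> ring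
        · simp only [hband, hb]
          refine Prod.ext ?_ (Prod.ext ?_ ?_) <;> (simp; try rw [hmapget2])

-- ===== VERDICT (by name: the statement is the Claim_ definition above) =====
theorem sum_check_spec : Claim_equal_sum_check := by
  intro arr n _ hpre
  show sum_check arr n = sum_check_alt arr n
  unfold sum_check sum_check_alt
  by_cases hn : 0 < n
  · rw [loop_eq_bits, go_eq_bits arr n (by omega) hpre]
    simp
  · rw [sum_check_loop, dif_neg hn]
    have hgo : sum_check_go arr n = (0, 0, 0) := by
      cases arr with
      | nil => rw [sum_check_go]
      | cons x rest => rw [sum_check_go, if_pos (by omega : n ≤ 0)]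
    simp [hgo]
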